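-- pv_equiv track=rewrite | github.com/Aboele13/CompleteW101Gear | findItemSource.py | clean_housing_gauntlet_list
-- ===== SOURCE A (Python) =====
-- def clean_housing_gauntlet_list(gauntlet_list):
--
--     i = 0
--
--     # remove (Tier x) from all gauntlet names
--     gauntlet_list = [gauntlet.split(" (Tier ")[0] for gauntlet in gauntlet_list]
--
--     while i < len(gauntlet_list):
--         gauntlet = gauntlet_list[i]
--         # needs to be updated if they add new one-shot gauntlets
--         if gauntlet == "TestHousingGauntlet" or (i > 0 and gauntlet == gauntlet_list[i - 1]) or (gauntlet == "Baddle of the Bands" or gauntlet == "Tanglewood Terror") or (gauntlet.split()[-1] == "Challenge" or gauntlet.split()[-1] == "Rematch"):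
--             gauntlet_list.pop(i)
--             i -= 1
--         i += 1
--
--     return gauntlet_list
-- ===== SOURCE B (Python) =====
-- def clean_housing_gauntlet_list(gauntlet_list):
--     # two passes: filter out blacklisted / Challenge / Rematch names, then collapse consecutive duplicates
--     stripped = [g.split(" (Tier ")[0] for g in gauntlet_list]
--     filtered = [g for g in stripped
--                 if g not in ("TestHousingGauntlet", "Baddle of the Bands", "Tanglewood Terror")
--                 and g.split()[-1] not in ("Challenge", "Rematch")]
--     out = []
--     for g in filtered:
--         if not out or out[-1] != g:
--             out.append(g)
--     return out
-- ===== Notes on version B (the rewrite author's own statement) =====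
-- stated objective: alternative
-- what changed: A's single in-place index loop that pops elements (interleaving blacklist/Challenge filtering with previous-element dedup) is replaced by two separate passes: a filter comprehension over the tier-stripped names, then a collapse of consecutive duplicates with an output accumulator.
import Mathlib
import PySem

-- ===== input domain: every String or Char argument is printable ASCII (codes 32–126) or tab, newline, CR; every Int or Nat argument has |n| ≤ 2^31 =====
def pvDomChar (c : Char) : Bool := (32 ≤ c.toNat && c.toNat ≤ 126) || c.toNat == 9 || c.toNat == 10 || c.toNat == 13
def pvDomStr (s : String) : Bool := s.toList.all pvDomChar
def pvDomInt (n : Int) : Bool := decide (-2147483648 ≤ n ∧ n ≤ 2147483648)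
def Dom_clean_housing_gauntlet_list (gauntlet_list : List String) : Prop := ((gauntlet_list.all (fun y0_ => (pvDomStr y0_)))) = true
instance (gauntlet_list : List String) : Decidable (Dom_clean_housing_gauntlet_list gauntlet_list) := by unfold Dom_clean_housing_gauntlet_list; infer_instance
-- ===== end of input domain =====

-- B replaces A's single in-place index/pop loop by two passes (filter, then collapse
-- consecutive duplicates); same result, different decomposition (objective: alternative).
-- A reassigns its parameter (no caller-visible mutation); return values are compared.


-- ===== PORT A =====

-- gauntlet.split(" (Tier ")[0]; index 0 of a nonempty-sep split always exists
def pvStrip (g : String) : String := (((PySem.Str.split? g " (Tier ").getD []).headD "")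

-- gauntlet.split()[-1]; none = IndexError (whitespace-only name), excluded by Pre_
def pvLastWord (g : String) : String := (PySem.List.pyGet? (PySem.Str.split₀ g) (-1)).getD ""

-- the while-loop's if-condition, in A's order
def pvCondA (xs : List String) (i : Nat) (g : String) : Bool :=
  g == "TestHousingGauntlet" ||
  (decide (0 < i) && g == (PySem.List.pyGet? xs ((i : Int) - 1)).getD "") ||
  (g == "Baddle of the Bands" || g == "Tanglewood Terror") ||
  (pvLastWord g == "Challenge" || pvLastWord g == "Rematch")

-- A's while loop: pop(i) (= eraseIdx at a valid index) then i -= 1; i += 1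
def pvLoopA (xs : List String) (i : Nat) : List String :=
  if h : i < xs.length then
    let g := xs[i]
    if pvCondA xs i g then pvLoopA (xs.eraseIdx i) i
    else pvLoopA xs (i + 1)
  else xs
termination_by xs.length - i
decreasing_by
  · have := List.length_eraseIdx_of_lt (l := xs) (i := i) h; omega
  · omega

def clean_housing_gauntlet_list (gauntlet_list : List String) : List String :=
  pvLoopA (gauntlet_list.map pvStrip) 0

-- ===== PORT B =====

-- B's filter predicate (blacklist membership, then last-word test)
def pvKeep (g : String) : Bool :=
  !(g == "TestHousingGauntlet" || g == "Baddle of the Bands" || g == "Tanglewood Terror") &&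
  !(pvLastWord g == "Challenge" || pvLastWord g == "Rematch")

-- B's second pass: 'if not out or out[-1] != g: out.append(g)'
def pvDedup (out : List String) (l : List String) : List String :=
  match l with
  | [] => out
  | g :: t =>
    if out.isEmpty || !((PySem.List.pyGet? out (-1)).getD "" == g) then pvDedup (out ++ [g]) t
    else pvDedup out t

def clean_housing_gauntlet_list_alt (gauntlet_list : List String) : List String :=
  pvDedup [] (((gauntlet_list.map pvStrip)).filter pvKeep)

-- ===== PRECONDITION & SPEC =====

-- Pre_ excludes exactly the inputs where some tier-stripped name is empty/whitespace-only:
-- there Python A (and B alike) raises IndexError on gauntlet.split()[-1].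
def pvHasWord (g : String) : Bool := !(PySem.Str.split₀ ((((PySem.Str.split? g " (Tier ").getD []).headD ""))).isEmpty
def Pre_clean_housing_gauntlet_list (gauntlet_list : List String) : Prop :=
  gauntlet_list.all pvHasWord = true
instance (gauntlet_list : List String) : Decidable (Pre_clean_housing_gauntlet_list gauntlet_list) := by
  unfold Pre_clean_housing_gauntlet_list; infer_instance

def pvWitness_clean_housing_gauntlet_list : List String :=
  ["Winterbane Hall (Tier 3)", "Winterbane Hall", "Foo Challenge", "Pagoda of Harmony"]

def Spec_clean_housing_gauntlet_list (gauntlet_list : List String) (out : List String) : Prop := out = clean_housing_gauntlet_list_alt gauntlet_list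
instance (gauntlet_list : List String) (out : List String) : Decidable (Spec_clean_housing_gauntlet_list gauntlet_list out) := by unfold Spec_clean_housing_gauntlet_list; infer_instance

-- ===== CLAIM (what is proved, stated in full; the proofs are below) =====
def Claim_equal_clean_housing_gauntlet_list : Prop := ∀ (gauntlet_list : List String), Dom_clean_housing_gauntlet_list gauntlet_list → Pre_clean_housing_gauntlet_list gauntlet_list → Spec_clean_housing_gauntlet_list gauntlet_list (clean_housing_gauntlet_list gauntlet_list)

-- ===== LEMMAS AND PROOFS =====

-- removal condition relative to the previous survivor (spec form of both programs)
def pvCondC (prev : Option String) (g : String) : Bool :=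
  g == "TestHousingGauntlet" || prev == some g ||
  g == "Baddle of the Bands" || g == "Tanglewood Terror" ||
  pvLastWord g == "Challenge" || pvLastWord g == "Rematch"

-- one-pass spec: filter + consecutive dedup relative to prev
def pvGo (prev : Option String) : List String → List String
  | [] => []
  | g :: t => if pvCondC prev g then pvGo prev t else g :: pvGo (some g) t

-- consecutive-dedup spec relative to prev
def pvD2 (prev : Option String) : List String → List String
  | [] => []
  | g :: t => if prev == some g then pvD2 prev t else g :: pvD2 (some g) t

theorem pvEraseIdx_append (kept : List String) (g : String) (t : List String) :
    (kept ++ g :: t).eraseIdx kept.length = kept ++ t := by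
  induction kept with
  | nil => rfl
  | cons a ks ih => simpa [List.eraseIdx_cons_succ] using ih

theorem pvCondA_eq (kept : List String) (g : String) (t : List String) :
    pvCondA (kept ++ g :: t) kept.length g = pvCondC kept.getLast? g := by
  have hmid : (decide (0 < kept.length) &&
      g == (PySem.List.pyGet? (kept ++ g :: t) ((kept.length : Int) - 1)).getD "")
      = (kept.getLast? == some g) := by
    rcases List.eq_nil_or_concat kept with rfl | ⟨ks, k, rfl⟩
    · simp
    · have hlen : ((ks.concat k).length : Int) - 1 = (ks.length : Int) := by
        simp
      rw [hlen]
      have hget : PySem.List.pyGet? (ks.concat k ++ g :: t) (ks.length : Int) = some k := by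
        have : ks.concat k ++ g :: t = ks ++ k :: (g :: t) := by simp
        rw [this, PySem.List.pyGet?_append_length]
      simp [List.concat_eq_append, eq_comm]
  unfold pvCondA pvCondC
  rw [hmid]
  cases kept.getLast? == some g <;> cases g == "TestHousingGauntlet" <;>
    cases g == "Baddle of the Bands" <;> cases g == "Tanglewood Terror" <;>
    cases pvLastWord g == "Challenge" <;> cases pvLastWord g == "Rematch" <;> rfl

theorem pvLoopA_append (rest : List String) : ∀ kept : List String,
    pvLoopA (kept ++ rest) kept.length = kept ++ pvGo kept.getLast? rest := by
  induction rest with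
  | nil => intro kept; rw [pvLoopA]; simp [pvGo]
  | cons g t ih =>
    intro kept
    rw [pvLoopA]
    have hlt : kept.length < (kept ++ g :: t).length := by simp
    rw [dif_pos hlt]
    have hget : (kept ++ g :: t)[kept.length]'hlt = g := by
      rw [List.getElem_append_right (le_refl _)]; simp
    simp only [hget, pvCondA_eq]
    cases hC : pvCondC kept.getLast? g
    · simp only [Bool.false_eq_true, if_false]
      have h1 : kept ++ g :: t = (kept ++ [g]) ++ t := by simp
      have h2 : kept.length + 1 = (kept ++ [g]).length := by simp
      rw [h1, h2, ih (kept ++ [g])]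
      simp [pvGo, hC]
    · simp only [if_true]
      rw [pvEraseIdx_append, ih kept]
      simp [pvGo, hC]

theorem pvDedup_eq (l : List String) : ∀ out : List String,
    pvDedup out l = out ++ pvD2 out.getLast? l := by
  induction l with
  | nil => intro out; simp [pvDedup, pvD2]
  | cons g t ih =>
    intro out
    rcases List.eq_nil_or_concat out with rfl | ⟨ks, k, rfl⟩
    · simp [pvDedup, pvD2, ih]
    · have hlast : (ks.concat k).getLast? = some k := by
        simp [List.concat_eq_append]
      have hguard : ((ks.concat k).isEmpty ||
          !((PySem.List.pyGet? (ks.concat k) (-1)).getD "" == g)) = !(k == g) := by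
        simp [PySem.List.pyGet?_neg_one, List.concat_eq_append]
      rw [pvDedup, hguard, pvD2, hlast]
      cases hk : k == g
      · have hsome : (some k == some g) = false := by simpa using hk
        rw [hsome]
        simp only [Bool.not_false, if_true, Bool.false_eq_true, if_false]
        rw [ih (ks.concat k ++ [g]), List.getLast?_concat]
        simp
      · have hsome : (some k == some g) = true := by simpa using hk
        rw [hsome]
        simp only [Bool.not_true, Bool.false_eq_true, if_false, if_true]
        rw [ih (ks.concat k), hlast]

theorem pvCondC_eq (prev : Option String) (g : String) :
    pvCondC prev g = (!pvKeep g || prev == some g) := by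
  unfold pvCondC pvKeep
  cases prev == some g <;> cases g == "TestHousingGauntlet" <;>
    cases g == "Baddle of the Bands" <;> cases g == "Tanglewood Terror" <;>
    cases pvLastWord g == "Challenge" <;> cases pvLastWord g == "Rematch" <;> rfl

theorem pvGo_eq_filter (l : List String) : ∀ prev : Option String,
    pvGo prev l = pvD2 prev (l.filter pvKeep) := by
  induction l with
  | nil => intro prev; rfl
  | cons g t ih =>
    intro prev
    rw [List.filter_cons]
    cases hk : pvKeep g
    · simp only [Bool.false_eq_true, if_false]
      rw [pvGo, pvCondC_eq, hk]
      simp [ih]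
    · simp only [if_true]
      rw [pvGo, pvCondC_eq, hk, pvD2]
      cases hp : prev == some g <;> simp [ih]

-- ===== VERDICT (by name: the statement is the Claim_ definition above) =====
theorem clean_housing_gauntlet_list_spec : Claim_equal_clean_housing_gauntlet_list := by
  intro gl _ _
  unfold Spec_clean_housing_gauntlet_list clean_housing_gauntlet_list clean_housing_gauntlet_list_alt
  have h1 := pvLoopA_append (gl.map pvStrip) []
  simp only [List.nil_append, List.length_nil, List.getLast?_nil] at h1
  rw [h1, pvGo_eq_filter, pvDedup_eq]
  simp
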